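-- pv_equiv track=rewrite | github.com/vosslab/hilbert-curve-brick | hilbert_curve_brick/curve.py | transpose_bits
-- ===== SOURCE A (Python) =====
-- def transpose_bits(values: list, destination_bits: int) -> list:
-- 	"""
-- 	Transpose bits between integers.
--
-- 	Args:
-- 		values: Source integers.
-- 		destination_bits: Output bit count.
--
-- 	Returns:
-- 		list: Transposed integers.
-- 	"""
-- 	srcs = list(values)
-- 	src_count = len(srcs)
-- 	dests = [0] * destination_bits
-- 	for dest_index in range(destination_bits - 1, -1, -1):
-- 		dest = 0
-- 		for src_index in range(src_count):
-- 			dest = dest * 2 + (srcs[src_index] % 2)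
-- 			srcs[src_index] //= 2
-- 		dests[dest_index] = dest
-- 	return dests
-- ===== SOURCE B (Python) =====
-- def transpose_bits(values: list, destination_bits: int) -> list:
-- 	"""Transpose bits between integers (closed-form per-bit extraction, no mutation)."""
-- 	n = len(values)
-- 	return [
-- 		sum(((v >> bit) & 1) << (n - 1 - i) for i, v in enumerate(values))
-- 		for bit in range(destination_bits - 1, -1, -1)
-- 	]
-- ===== Notes on version B (the rewrite author's own statement) =====
-- stated objective: alternative
-- what changed: A builds each destination with a sequential dest=dest*2+bit loop while destructively halving a copy of the sources; B is a closed-form comprehension computing each destination directly as the sum of one extracted bit ((v >> bit) & 1) per source shifted to its weight, with no mutation and no preallocated array.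
import Mathlib
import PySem

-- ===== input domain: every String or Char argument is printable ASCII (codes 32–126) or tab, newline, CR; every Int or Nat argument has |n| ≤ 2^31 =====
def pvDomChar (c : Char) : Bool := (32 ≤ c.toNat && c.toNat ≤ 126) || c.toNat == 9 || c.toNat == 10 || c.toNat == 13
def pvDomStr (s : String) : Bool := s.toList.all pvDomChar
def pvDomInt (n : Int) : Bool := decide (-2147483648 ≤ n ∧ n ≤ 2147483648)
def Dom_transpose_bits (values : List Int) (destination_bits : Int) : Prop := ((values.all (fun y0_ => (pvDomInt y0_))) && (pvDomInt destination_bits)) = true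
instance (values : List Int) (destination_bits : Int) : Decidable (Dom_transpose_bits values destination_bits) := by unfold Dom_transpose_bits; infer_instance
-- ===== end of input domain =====

-- B rewrites A's mutate-and-shift transpose as a closed-form comprehension: each output is the
-- weighted sum of one bit of every source, extracted directly with // and % (no mutation, no
-- preallocated array). Objective: alternative (same O(n·destination_bits) cost).

-- ===== PORT A =====
-- Inner loop of A: `for src_index in range(src_count): dest = dest*2 + srcs[src_index] % 2;
-- srcs[src_index] //= 2` — the index loop visits each element of `srcs` once in order, so it is
-- the structural recursion carrying `dest` and rebuilding the mutated `srcs`.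
def pvInnerA (dest : Int) : List Int → Int × List Int
  | [] => (dest, [])
  | v :: rest =>
      let d := dest * 2 + PySem.Int.mod v 2
      let r := pvInnerA d rest
      (r.1, PySem.Int.floordiv v 2 :: r.2)

-- One iteration of A's outer loop: state is (srcs, dests); `dests[dest_index] = dest`.
-- `dest_index` is always in range (0 ≤ dest_index < len(dests)), so total `pySetD` is exact here.
def pvOuterStepA (st : List Int × List Int) (dest_index : Int) : List Int × List Int :=
  let r := pvInnerA 0 st.1
  (r.2, PySem.List.pySetD st.2 dest_index r.1)

def transpose_bits (values : List Int) (destination_bits : Int) : List Int :=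
  let srcs := values
  -- `[0] * destination_bits` is `[]` for destination_bits ≤ 0, exactly `.toNat`'s clamping
  let dests := List.replicate destination_bits.toNat 0
  ((PySem.List.pyRange (destination_bits - 1) (-1) (-1)).foldl pvOuterStepA (srcs, dests)).2

-- ===== PORT B =====
-- `[sum(((v >> bit) & 1) << (n-1-i) for i, v in enumerate(values)) for bit in range(destination_bits-1,-1,-1)]`
-- Python's `>>`/`<<` on int are Lean's `>>>`/`<<<` (Nat shift count); `bit` and `n-1-i` are ≥ 0
-- on every element produced by range/enumerate, so `.toNat` is exact.
def transpose_bits_alt (values : List Int) (destination_bits : Int) : List Int :=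
  let n : Int := PySem.List.len values
  (PySem.List.pyRange (destination_bits - 1) (-1) (-1)).map (fun bit =>
    ((PySem.List.enumerate values).map (fun p =>
        PySem.Int.band (p.2 >>> bit.toNat) 1 <<< (n - 1 - p.1).toNat)).sum)

-- ===== PRECONDITION & SPEC =====
def Spec_transpose_bits (values : List Int) (destination_bits : Int) (out : List Int) : Prop := out = transpose_bits_alt values destination_bits
instance (values : List Int) (destination_bits : Int) (out : List Int) : Decidable (Spec_transpose_bits values destination_bits out) := by unfold Spec_transpose_bits; infer_instance

-- ===== CLAIM (what is proved, stated in full; the proofs are below) =====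
def Claim_equal_transpose_bits : Prop := ∀ (values : List Int) (destination_bits : Int), Dom_transpose_bits values destination_bits → Spec_transpose_bits values destination_bits (transpose_bits values destination_bits)

-- ===== LEMMAS AND PROOFS =====

-- bit `bit` of `v` (Python `v // 2**bit % 2`), the per-element extractor of B
def pvFB (bit : Int) (v : Int) : Int := PySem.Int.mod (PySem.Int.floordiv v (2 ^ bit.toNat)) 2

-- weighted sum Σ f(xs[i]) * 2^(n-1-i), written structurally
def pvGs (f : Int → Int) : List Int → Int
  | [] => 0
  | v :: rest => f v * 2 ^ rest.length + pvGs f rest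

def pvHalve (xs : List Int) : List Int := xs.map (fun v => PySem.Int.floordiv v 2)

-- the index list [m-1, m-2, …, 0] that both ports' range produces
def pvDesc (m : Nat) : List Int := (List.range m).map (fun k : Nat => (m : Int) - 1 - (k : Int))

lemma pvDesc_eq_pyRange (m : Nat) :
    PySem.List.pyRange ((m : Int) - 1) (-1) (-1) = pvDesc m := by
  rw [PySem.List.pyRange_neg_one]
  have h : ((m : Int) - 1 - -1).toNat = m := by omega
  rw [h, pvDesc]

lemma pvDesc_succ (m : Nat) : pvDesc (m + 1) = (m : Int) :: pvDesc m := by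
  unfold pvDesc
  rw [List.range_succ_eq_map, List.map_cons, List.map_map]
  congr 1
  · push_cast; ring
  · apply List.map_congr_left
    intro k _
    simp [Function.comp, Nat.succ_eq_add_one]
    omega

lemma pvDesc_succ' (m : Nat) : pvDesc (m + 1) = (pvDesc m).map (· + 1) ++ [0] := by
  unfold pvDesc
  rw [List.range_succ, List.map_append, List.map_map]
  congr 1
  · apply List.map_congr_left
    intro k _
    simp [Function.comp]
    omega
  · simp

lemma pvDesc_mem {m : Nat} {j : Int} (h : j ∈ pvDesc m) : 0 ≤ j ∧ j < (m : Int) := by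
  unfold pvDesc at h
  rw [List.mem_map] at h
  obtain ⟨k, hk, rfl⟩ := h
  rw [List.mem_range] at hk
  omega

lemma pvEnumSum (f : Int → Int) :
    ∀ (xs : List Int) (s n : Int), n = s + xs.length →
      ((PySem.List.enumerate xs s).map (fun p => f p.2 * 2 ^ (n - 1 - p.1).toNat)).sum
        = pvGs f xs := by
  intro xs
  induction xs with
  | nil => intro s n _; simp [PySem.List.enumerate_nil, pvGs]
  | cons v rest ih =>
    intro s n hn
    rw [PySem.List.enumerate_cons, List.map_cons, List.sum_cons, pvGs,
        ih (s + 1) n (by simp at hn ⊢; omega)]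
    have h1 : n - 1 - s = (rest.length : Int) := by simp at hn; omega
    rw [h1, Int.toNat_natCast]

lemma pvInnerA_eq : ∀ (xs : List Int) (dest : Int),
    pvInnerA dest xs = (dest * 2 ^ xs.length + pvGs (fun v => PySem.Int.mod v 2) xs, pvHalve xs) := by
  intro xs
  induction xs with
  | nil => intro dest; simp [pvInnerA, pvGs, pvHalve]
  | cons v rest ih =>
    intro dest
    simp only [pvInnerA, ih, pvGs, pvHalve, List.map_cons, List.length_cons]
    simp only [Prod.mk.injEq]
    exact ⟨by rw [pow_succ]; ring, trivial⟩

lemma pvFB_zero : pvFB 0 = fun v => PySem.Int.mod v 2 := by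
  funext v
  simp [pvFB, PySem.Int.floordiv]

lemma pvFB_succ {bi : Int} (h : 0 ≤ bi) (v : Int) :
    pvFB (bi + 1) v = pvFB bi (PySem.Int.floordiv v 2) := by
  unfold pvFB
  have ht : (bi + 1).toNat = bi.toNat + 1 := by omega
  rw [ht]
  congr 1
  rw [PySem.Int.floordiv_eq_ediv_of_pos (by positivity),
      PySem.Int.floordiv_eq_ediv_of_pos (by norm_num),
      PySem.Int.floordiv_eq_ediv_of_pos (by positivity),
      show v / 2 / 2 ^ bi.toNat = v / (2 * 2 ^ bi.toNat) from Int.ediv_ediv_of_nonneg (by norm_num),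
      pow_succ]
  ring_nf

-- B's extractor `(v >> bit) & 1` is bit `bit` of `v`
lemma pvFB_eq_shift (bit : Int) : (fun v : Int => PySem.Int.band (v >>> bit.toNat) 1) = pvFB bit := by
  funext v
  rw [PySem.Int.band_one]
  unfold pvFB
  congr 1
  rw [Int.shiftRight_eq_div_pow, PySem.Int.floordiv_eq_ediv_of_pos (by positivity)]
  push_cast
  rfl

lemma pvGs_halve (f : Int → Int) : ∀ (xs : List Int),
    pvGs f (pvHalve xs) = pvGs (fun v => f (PySem.Int.floordiv v 2)) xs := by
  intro xs
  induction xs with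
  | nil => rfl
  | cons v rest ih => simp only [pvHalve, List.map_cons, pvGs, List.length_map] at ih ⊢; rw [ih]

lemma pvUntouched : ∀ (L : List Int) (s X Y : List Int),
    (∀ j ∈ L, 0 ≤ j ∧ j < (X.length : Int)) →
      L.foldl pvOuterStepA (s, X ++ Y)
        = ((L.foldl pvOuterStepA (s, X)).1, (L.foldl pvOuterStepA (s, X)).2 ++ Y) := by
  intro L
  induction L with
  | nil => intro s X Y _; rfl
  | cons j L ih =>
    intro s X Y hb
    obtain ⟨hj0, hjlt⟩ := hb j List.mem_cons_self
    simp only [List.foldl_cons]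
    have hset : ∀ w, PySem.List.pySetD (X ++ Y) j w = PySem.List.pySetD X j w ++ Y := by
      intro w
      rw [PySem.List.pySetD_of_nonneg _ _ hj0, PySem.List.pySetD_of_nonneg _ _ hj0,
          List.set_append_left _ _ (by omega : j.toNat < X.length)]
    simp only [pvOuterStepA]
    rw [hset]
    rw [ih]
    intro j' hj'
    have h' := hb j' (List.mem_cons_of_mem _ hj')
    rwa [PySem.List.length_pySetD]

lemma pvOut : ∀ (m : Nat) (xs : List Int),
    ((pvDesc m).foldl pvOuterStepA (xs, List.replicate m 0)).2
      = (pvDesc m).map (fun bi => pvGs (pvFB bi) xs) := by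
  intro m
  induction m with
  | zero => intro xs; rfl
  | succ m ih =>
    intro xs
    have hL : ((pvDesc (m + 1)).foldl pvOuterStepA (xs, List.replicate (m + 1) 0)).2
        = (pvDesc m).map (fun bi => pvGs (pvFB bi) (pvHalve xs))
            ++ [pvGs (fun v => PySem.Int.mod v 2) xs] := by
      rw [pvDesc_succ, List.foldl_cons]
      have hstep : pvOuterStepA (xs, List.replicate (m + 1) 0) (m : Int)
          = (pvHalve xs, List.replicate m 0 ++ [pvGs (fun v => PySem.Int.mod v 2) xs]) := by
        simp only [pvOuterStepA, pvInnerA_eq, zero_mul, zero_add, PySem.List.pySetD_natCast,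
          List.replicate_succ']
        rw [List.set_append_right _ _ (by simp), List.length_replicate]
        simp
      rw [hstep,
        pvUntouched (pvDesc m) (pvHalve xs) (List.replicate m 0) _
          (by intro j hj; have := pvDesc_mem hj; simpa using this),
        ih (pvHalve xs)]
    rw [hL, pvDesc_succ', List.map_append, List.map_map]
    congr 1
    · apply List.map_congr_left
      intro bi hbi
      have h0 : 0 ≤ bi := (pvDesc_mem hbi).1
      rw [pvGs_halve]
      exact congrFun (congrArg pvGs (funext fun v => (pvFB_succ h0 v).symm)) xs
    · simp [pvFB_zero]

-- ===== VERDICT (by name: the statement is the Claim_ definition above) =====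
theorem transpose_bits_spec : Claim_equal_transpose_bits := by
  intro values db _
  unfold Spec_transpose_bits transpose_bits transpose_bits_alt
  simp only [PySem.List.len_eq]
  rcases lt_or_ge 0 db with hpos | hle
  · have hm : db = ((db.toNat : Nat) : Int) := by omega
    rw [hm]
    rw [pvDesc_eq_pyRange, Int.toNat_natCast, pvOut]
    apply List.map_congr_left
    intro bit _
    rw [← pvEnumSum (pvFB bit) values 0 ((values.length : Int)) (by simp)]
    congr 1
    apply List.map_congr_left
    intro p _
    rw [Int.shiftLeft_eq]
    exact congrArg (· * 2 ^ ((values.length : Int) - 1 - p.1).toNat) (congrFun (pvFB_eq_shift bit) p.2).symm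
  · have h0 : db.toNat = 0 := by omega
    rw [PySem.List.pyRange_neg_one_eq_nil (by omega : db - 1 ≤ -1), h0]
    rfl
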